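-- pv_equiv track=rewrite | github.com/stanley-tw/QA_RAG_Classifier | src/pipeline/similarity.py | generate_candidate_pairs
-- ===== SOURCE A (Python) =====
-- from typing import Dict, Iterable, List, Sequence, Tuple
--
-- def generate_candidate_pairs(
--     candidate_ids: Iterable[str],
--     normalized_names: Dict[str, str],
--     prefix_len: int = 4,
--     length_window: int = 6,
-- ) -> List[Tuple[str, str]]:
--     buckets: Dict[str, List[Tuple[str, int]]] = {}
--     for cid in candidate_ids:
--         name = normalized_names.get(cid, "")
--         key = name[:prefix_len]
--         buckets.setdefault(key, []).append((cid, len(name)))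
--
--     pairs: List[Tuple[str, str]] = []
--     for items in buckets.values():
--         items.sort(key=lambda item: item[1])
--         for i in range(len(items)):
--             a_id, a_len = items[i]
--             for j in range(i + 1, len(items)):
--                 b_id, b_len = items[j]
--                 if b_len - a_len > length_window:
--                     break
--                 pairs.append((a_id, b_id))
--     return pairs
-- ===== SOURCE B (Python) =====
-- from typing import Dict, Iterable, List, Tuple
--
-- def generate_candidate_pairs(
--     candidate_ids: Iterable[str],
--     normalized_names: Dict[str, str],
--     prefix_len: int = 4,
--     length_window: int = 6,
-- ) -> List[Tuple[str, str]]: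
--     buckets: Dict[str, List[Tuple[str, int]]] = {}
--     for cid in candidate_ids:
--         name = normalized_names.get(cid, "")
--         buckets.setdefault(name[:prefix_len], []).append((cid, len(name)))
--
--     pairs: List[Tuple[str, str]] = []
--     for items in buckets.values():
--         items.sort(key=lambda item: item[1])
--         n = len(items)
--         hi = 0  # sliding right boundary: lengths are sorted, so it only moves forward
--         for i in range(n):
--             a_id, a_len = items[i]
--             if hi < i + 1:
--                 hi = i + 1
--             while hi < n and items[hi][1] - a_len <= length_window:
--                 hi += 1
--             pairs.extend((a_id, b_id) for b_id, _ in items[i + 1:hi])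
--     return pairs
-- ===== Notes on version B (the rewrite author's own statement) =====
-- stated objective: alternative
-- what changed: The per-bucket inner break-scan over j is replaced by a monotone two-pointer sliding window: a single right boundary 'hi' that only moves forward across the whole bucket, each row's partners taken as one slice items[i+1:hi].
import Mathlib
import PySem

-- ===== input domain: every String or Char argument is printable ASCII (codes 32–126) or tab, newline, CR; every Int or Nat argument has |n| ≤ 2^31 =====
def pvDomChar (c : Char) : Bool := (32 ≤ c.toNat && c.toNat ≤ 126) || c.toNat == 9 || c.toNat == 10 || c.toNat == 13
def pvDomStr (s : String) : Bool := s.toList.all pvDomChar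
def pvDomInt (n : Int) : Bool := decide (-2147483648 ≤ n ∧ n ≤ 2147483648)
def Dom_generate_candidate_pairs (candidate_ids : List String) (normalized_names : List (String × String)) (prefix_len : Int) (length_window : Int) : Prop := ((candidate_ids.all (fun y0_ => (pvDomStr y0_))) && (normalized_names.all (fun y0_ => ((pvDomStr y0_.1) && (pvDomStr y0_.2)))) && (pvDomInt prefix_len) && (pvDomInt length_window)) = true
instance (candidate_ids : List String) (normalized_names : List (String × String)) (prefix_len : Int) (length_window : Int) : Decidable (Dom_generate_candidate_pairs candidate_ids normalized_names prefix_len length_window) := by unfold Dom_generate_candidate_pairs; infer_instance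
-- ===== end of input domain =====

-- B replaces the per-bucket inner break-scan with a forward-only two-pointer
-- sliding window emitting each row's partners as one slice (alternative decomposition).


-- ===== PORT A =====

-- bucket-building phase, identical lines in A and B (dict grouping by name[:prefix_len])
def pvBuckets (candidate_ids : List String) (normalized_names : List (String × String)) (prefix_len : Int) : PySem.Dict String (List (String × Int)) :=
  let nn := PySem.Dict.ofList normalized_names
  candidate_ids.foldl (fun d cid =>
    let name := nn.getD cid ""
    d.modify (PySem.Str.slice name none (some prefix_len)) [] (· ++ [(cid, PySem.Str.len name)]))
    PySem.Dict.empty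

-- A's inner j-loop from i+1 with break on b_len - a_len > length_window
def pvScanA (a_id : String) (a_len w : Int) : List (String × Int) → List (String × String)
  | [] => []
  | (b_id, b_len) :: rest =>
      if b_len - a_len > w then [] else (a_id, b_id) :: pvScanA a_id a_len w rest

-- A's outer i-loop over the sorted bucket
def pvOuterA (w : Int) : List (String × Int) → List (String × String)
  | [] => []
  | (a_id, a_len) :: rest => pvScanA a_id a_len w rest ++ pvOuterA w rest

def generate_candidate_pairs (candidate_ids : List String) (normalized_names : List (String × String)) (prefix_len : Int) (length_window : Int) : List (String × String) :=
  (pvBuckets candidate_ids normalized_names prefix_len).values.foldl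
    (fun pairs items =>
      pairs ++ pvOuterA length_window (PySem.List.sorted items (fun p => p.2) false)) []

-- ===== PORT B =====

-- Source B's 'while hi < n and items[hi][1] - a_len <= length_window: hi += 1'
def pvAdvance (items : List (String × Int)) (a_len w : Int) (n : Nat) (hi : Nat) : Nat :=
  if hi < n ∧ (items.getD hi ("", 0)).2 - a_len ≤ w then pvAdvance items a_len w n (hi + 1)
  else hi
termination_by n - hi

-- Source B's 'for i in range(n)' loop carrying the sliding boundary hi
def pvLoopB (items : List (String × Int)) (w : Int) (n : Nat) (i hi : Nat) (pairs : List (String × String)) : List (String × String) :=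
  if i < n then
    let a := items.getD i ("", 0)
    let hi1 := if hi < i + 1 then i + 1 else hi
    let hi2 := pvAdvance items a.2 w n hi1
    pvLoopB items w n (i + 1) hi2
      (pairs ++ ((items.drop (i + 1)).take (hi2 - (i + 1))).map (fun p => (a.1, p.1)))
  else pairs
termination_by n - i

def generate_candidate_pairs_alt (candidate_ids : List String) (normalized_names : List (String × String)) (prefix_len : Int) (length_window : Int) : List (String × String) :=
  (pvBuckets candidate_ids normalized_names prefix_len).values.foldl
    (fun pairs items =>
      let s := PySem.List.sorted items (fun p => p.2) false
      pvLoopB s length_window s.length 0 0 pairs) []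

-- ===== PRECONDITION & SPEC =====
def Spec_generate_candidate_pairs (candidate_ids : List String) (normalized_names : List (String × String)) (prefix_len : Int) (length_window : Int) (out : List (String × String)) : Prop := out = generate_candidate_pairs_alt candidate_ids normalized_names prefix_len length_window
instance (candidate_ids : List String) (normalized_names : List (String × String)) (prefix_len : Int) (length_window : Int) (out : List (String × String)) : Decidable (Spec_generate_candidate_pairs candidate_ids normalized_names prefix_len length_window out) := by unfold Spec_generate_candidate_pairs; infer_instance

-- ===== CLAIM (what is proved, stated in full; the proofs are below) =====
def Claim_equal_generate_candidate_pairs : Prop := ∀ (candidate_ids : List String) (normalized_names : List (String × String)) (prefix_len : Int) (length_window : Int), Dom_generate_candidate_pairs candidate_ids normalized_names prefix_len length_window → Spec_generate_candidate_pairs candidate_ids normalized_names prefix_len length_window (generate_candidate_pairs candidate_ids normalized_names prefix_len length_window)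

-- ===== LEMMAS AND PROOFS =====

theorem pvScanA_eq_takeWhile (a_id : String) (a_len w : Int) (l : List (String × Int)) :
    pvScanA a_id a_len w l
      = (l.takeWhile (fun p => p.2 - a_len ≤ w)).map (fun p => (a_id, p.1)) := by
  induction l with
  | nil => rfl
  | cons p rest ih =>
      obtain ⟨b, bl⟩ := p
      by_cases h : bl - a_len > w
      · simp [pvScanA, h, List.takeWhile, not_le.mpr h]
      · simp [pvScanA, h, List.takeWhile, not_lt.mp h, ih]

theorem pv_takeWhile_eq_take {α : Type} (p : α → Bool) (l : List α) (m : Nat) (hm : m ≤ l.length)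
    (hall : ∀ k (hk : k < m), p (l[k]'(by omega)) = true)
    (hstop : ∀ (h : m < l.length), p (l[m]'h) = false) :
    l.takeWhile p = l.take m := by
  induction l generalizing m with
  | nil => simp
  | cons x xs ih =>
      cases m with
      | zero =>
          have := hstop (by simp)
          simp at this
          simp [List.takeWhile, this]
      | succ m' =>
          have hx := hall 0 (by omega)
          simp at hx
          simp only [List.takeWhile, hx, List.take]
          congr 1
          exact ih m' (by simpa using hm) (fun k hk => hall (k + 1) (by omega))
            (fun h => hstop (by simpa using h))

theorem pvAdvance_ge (items : List (String × Int)) (a_len w : Int) (n hi : Nat) :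
    hi ≤ pvAdvance items a_len w n hi := by
  unfold pvAdvance
  split
  · have := pvAdvance_ge items a_len w n (hi + 1); omega
  · omega
termination_by n - hi
decreasing_by rename_i h; omega

theorem pvAdvance_le (items : List (String × Int)) (a_len w : Int) (n hi : Nat) (h : hi ≤ n) :
    pvAdvance items a_len w n hi ≤ n := by
  unfold pvAdvance
  split
  · rename_i hc; exact pvAdvance_le items a_len w n (hi + 1) (by omega)
  · exact h
termination_by n - hi
decreasing_by rename_i h'; omega

theorem pvAdvance_pred (items : List (String × Int)) (a_len w : Int) (n hi : Nat) :
    ∀ k, hi ≤ k → k < pvAdvance items a_len w n hi →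
      (items.getD k ("", 0)).2 - a_len ≤ w := by
  unfold pvAdvance
  split
  · rename_i hc
    intro k hk1 hk2
    rcases Nat.eq_or_lt_of_le hk1 with rfl | hlt
    · exact hc.2
    · exact pvAdvance_pred items a_len w n (hi + 1) k hlt hk2
  · rename_i hc
    intro k hk1 hk2
    omega
termination_by n - hi
decreasing_by rename_i h; omega

theorem pvAdvance_stop (items : List (String × Int)) (a_len w : Int) (n hi : Nat)
    (h : pvAdvance items a_len w n hi < n) :
    ¬ (items.getD (pvAdvance items a_len w n hi) ("", 0)).2 - a_len ≤ w := by
  by_cases hc : hi < n ∧ (items.getD hi ("", 0)).2 - a_len ≤ w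
  · rw [pvAdvance, if_pos hc] at h ⊢
    exact pvAdvance_stop items a_len w n (hi + 1) h
  · rw [pvAdvance, if_neg hc] at h ⊢
    intro hle; exact hc ⟨h, hle⟩
termination_by n - hi
decreasing_by omega

-- sortedness transferred to getD form
theorem pv_sorted_getD_mono (L : List (String × Int))
    (hL : L.Pairwise (fun a b => a.2 ≤ b.2)) (p q : Nat) (hpq : p ≤ q) (hq : q < L.length) :
    (L.getD p ("", 0)).2 ≤ (L.getD q ("", 0)).2 := by
  rw [List.getD_eq_getElem L _ (by omega), List.getD_eq_getElem L _ hq]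
  rcases Nat.eq_or_lt_of_le hpq with rfl | hlt
  · exact le_refl _
  · exact (List.pairwise_iff_getElem.mp hL) p q (by omega) hq hlt

-- the sliding-window loop computes exactly A's scan-per-row output
theorem pvLoopB_eq (L : List (String × Int)) (w : Int)
    (hL : L.Pairwise (fun a b => a.2 ≤ b.2)) :
    ∀ (m i hi : Nat) (acc : List (String × String)),
      m = L.length - i → hi ≤ L.length →
      (∀ k, i + 1 ≤ k → k < hi → (L.getD k ("", 0)).2 ≤ (L.getD i ("", 0)).2 + w) →
      pvLoopB L w L.length i hi acc = acc ++ pvOuterA w (L.drop i) := by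
  intro m
  induction m with
  | zero =>
      intro i hi acc hm hhi hinv
      have hi_ge : L.length ≤ i := by omega
      rw [pvLoopB]
      simp [Nat.not_lt.mpr hi_ge, List.drop_eq_nil_of_le hi_ge, pvOuterA]
  | succ m' ih =>
      intro i hi acc hm hhi hinv
      have hi_lt : i < L.length := by omega
      rw [pvLoopB]
      simp only [hi_lt, if_pos]
      set a := L.getD i ("", 0) with ha
      set hi1 := if hi < i + 1 then i + 1 else hi with hhi1
      have hhi1_ge : i + 1 ≤ hi1 := by rw [hhi1]; split <;> omega
      have hhi1_le : hi1 ≤ L.length ∨ hi1 = i + 1 := by rw [hhi1]; split <;> omega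
      have hhi1_le' : hi1 ≤ L.length := by
        rcases hhi1_le with h | h
        · exact h
        · omega
      set hi2 := pvAdvance L a.2 w L.length hi1 with hhi2
      have h2ge : hi1 ≤ hi2 := pvAdvance_ge _ _ _ _ _
      have h2le : hi2 ≤ L.length := pvAdvance_le _ _ _ _ _ hhi1_le'
      -- every index in [i+1, hi2) satisfies the window predicate
      have hall : ∀ k, i + 1 ≤ k → k < hi2 → (L.getD k ("", 0)).2 - a.2 ≤ w := by
        intro k hk1 hk2
        by_cases hk : k < hi1
        · -- from the carried invariant (hi1 = hi here, since k ≥ i+1 and k < hi1)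
          have : k < hi := by rw [hhi1] at hk; split at hk <;> omega
          have := hinv k hk1 this
          omega
        · exact pvAdvance_pred L a.2 w L.length hi1 k (by omega) hk2
      -- the emitted slice is A's takeWhile of the tail
      have hslice : (L.drop (i + 1)).take (hi2 - (i + 1))
          = (L.drop (i + 1)).takeWhile (fun p => p.2 - a.2 ≤ w) := by
        refine (pv_takeWhile_eq_take _ _ (hi2 - (i + 1)) (by simp; omega) ?_ ?_).symm
        · intro k hk
          have hidx : i + 1 + k < L.length := by omega
          have : (L.drop (i + 1))[k]'(by simp; omega) = L[i + 1 + k]'hidx := by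
            simp [List.getElem_drop]
          rw [this]
          have := hall (i + 1 + k) (by omega) (by omega)
          rw [List.getD_eq_getElem L _ hidx] at this
          simpa using this
        · intro h
          have hidx : i + 1 + (hi2 - (i + 1)) < L.length := by simp at h; omega
          have hi2idx : i + 1 + (hi2 - (i + 1)) = hi2 := by omega
          have : (L.drop (i + 1))[hi2 - (i + 1)]'h = L[hi2]'(by omega) := by
            simp [List.getElem_drop, hi2idx]
          rw [this]
          have hstop := pvAdvance_stop L a.2 w L.length hi1 (by rw [← hhi2]; omega)
          rw [← hhi2] at hstop
          rw [List.getD_eq_getElem L _ (by omega : hi2 < L.length)] at hstop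
          simpa using hstop
      -- recurse
      rw [ih (i + 1) hi2 _ (by omega) h2le ?_]
      · -- reassemble: acc ++ slice-pairs ++ rest = acc ++ outerA (drop i)
        have hdrop : L.drop i = L.getD i ("", 0) :: L.drop (i + 1) := by
          rw [List.getD_eq_getElem L _ hi_lt]
          exact (List.drop_eq_getElem_cons hi_lt)
        rw [hdrop]
        show acc ++ _ ++ _ = acc ++ pvOuterA w ((a.1, a.2) :: L.drop (i + 1))
        rw [pvOuterA, pvScanA_eq_takeWhile, ← hslice, List.append_assoc]
      · -- invariant at i+1
        intro k hk1 hk2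
        have h1 := hall k (by omega) hk2
        have h2 : a.2 ≤ (L.getD (i + 1) ("", 0)).2 :=
          pv_sorted_getD_mono L hL i (i + 1) (by omega) (by omega)
        omega

theorem pvLoopB_bucket (items : List (String × Int)) (w : Int) (acc : List (String × String)) :
    pvLoopB (PySem.List.sorted items (fun p => p.2) false) w
        (PySem.List.sorted items (fun p => p.2) false).length 0 0 acc
      = acc ++ pvOuterA w (PySem.List.sorted items (fun p => p.2) false) := by
  have h := pvLoopB_eq (PySem.List.sorted items (fun p => p.2) false) w
    (PySem.List.sorted_pairwise items (fun p => p.2))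
    ((PySem.List.sorted items (fun p => p.2) false).length) 0 0 acc (by omega)
    (by omega) (by intro k hk1 hk2; omega)
  simpa using h

theorem pv_fold_eq (w : Int) (vs : List (List (String × Int))) :
    ∀ acc : List (String × String),
      vs.foldl (fun pairs items =>
          let s := PySem.List.sorted items (fun p => p.2) false
          pvLoopB s w s.length 0 0 pairs) acc
        = vs.foldl (fun pairs items =>
            pairs ++ pvOuterA w (PySem.List.sorted items (fun p => p.2) false)) acc := by
  induction vs with
  | nil => intro acc; rfl
  | cons v vs ih =>
      intro acc
      simp only [List.foldl_cons]
      rw [ih, pvLoopB_bucket]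

-- ===== VERDICT (by name: the statement is the Claim_ definition above) =====
theorem generate_candidate_pairs_spec : Claim_equal_generate_candidate_pairs := by
  intro candidate_ids normalized_names prefix_len length_window _
  unfold Spec_generate_candidate_pairs generate_candidate_pairs generate_candidate_pairs_alt
  rw [pv_fold_eq]
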